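-- pv_equiv track=rewrite | github.com/h-ismkhan/run-revnano-on-windows | REVNANO/dna.py | sequence_type
-- ===== SOURCE A (Python) =====
-- def star_delim_valid(seq) :
--
-- 	if "*" not in seq :
-- 		return True
--
-- 	if seq.count("*") % 2 == 1 :
-- 		return False 	# odd number of * delim in string not allowed
--
-- 	if "**" in seq :
-- 		return False 	# empty base sequence between delimiters not allowed
--
-- 	return True
--
-- def sequence_type(seq) :
-- 	"""Given a string of uppercase letters, returns if its a nucleic acid sequence, or text
--
-- 	The string is allowed to contain an even number of * delimiters, where at least
-- 	1 base must be present between each star pair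
--
-- 	Returns:
-- 	"NUCLEIC ACID" if its a valid nucleic acid sequence (which may contain * delimiters or not)
-- 	"UT MISTAKE" if its a nucleic acid sequence containing both RNA and DNA bases by mistake
-- 	(Some origami sequence listings have this error. Sequences are either DNA or RNA.)
-- 	"* DELIMITER MISTAKE" if and odd number of * delimiters are present, or if a
-- 	delimiter pair does not contain at least one base letter
-- 	"TEXT" if it contains letters other than the 5 nucleic acid DNA/RNA bases
-- 	"""
--
-- 	if not star_delim_valid(seq) :
-- 		return "* DELIMITER MISTAKE"
--
-- 	dna = [s in ["A", "C", "G", "T", "*"] for s in seq]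
-- 	is_dna = (sum(dna) == len(seq))
--
-- 	rna = [s in ["A", "C", "G", "U", "*"] for s in seq]
-- 	is_rna = (sum(rna) == len(seq))
--
-- 	mistake = [s in ["A", "C", "G", "U", "T", "*"] for s in seq]
-- 	is_mistake = (sum(mistake) == len(seq))
--
-- 	if is_dna or is_rna :
-- 		return "NUCLEIC ACID"
-- 	elif is_mistake : 		# important to check AFTER is_dna or is_rna
-- 		return "UT MISTAKE"
-- 	else :
-- 		return "TEXT"
-- ===== SOURCE B (Python) =====
-- def star_delim_valid(seq):
--     if "*" not in seq:
--         return True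
--     if seq.count("*") % 2 == 1:
--         return False
--     if "**" in seq:
--         return False
--     return True
--
-- def sequence_type(seq):
--     if not star_delim_valid(seq):
--         return "* DELIMITER MISTAKE"
--     seen_t = seen_u = other = False
--     for c in seq:
--         if c == 'T':
--             seen_t = True
--         elif c == 'U':
--             seen_u = True
--         elif c not in ('A', 'C', 'G', '*'):
--             other = True
--     if other:
--         return "TEXT"
--     if seen_t and seen_u:
--         return "UT MISTAKE"
--     return "NUCLEIC ACID"
-- ===== Notes on version B (the rewrite author's own statement) =====
-- stated objective: alternative
-- what changed: Replaces A's three staged full-length indicator-list passes compared against len(seq) by a single pass that accumulates three boolean flags (T seen, U seen, non-base seen) and decides the category from the flags, with TEXT tested first and NUCLEIC ACID as the default.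
import Mathlib
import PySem

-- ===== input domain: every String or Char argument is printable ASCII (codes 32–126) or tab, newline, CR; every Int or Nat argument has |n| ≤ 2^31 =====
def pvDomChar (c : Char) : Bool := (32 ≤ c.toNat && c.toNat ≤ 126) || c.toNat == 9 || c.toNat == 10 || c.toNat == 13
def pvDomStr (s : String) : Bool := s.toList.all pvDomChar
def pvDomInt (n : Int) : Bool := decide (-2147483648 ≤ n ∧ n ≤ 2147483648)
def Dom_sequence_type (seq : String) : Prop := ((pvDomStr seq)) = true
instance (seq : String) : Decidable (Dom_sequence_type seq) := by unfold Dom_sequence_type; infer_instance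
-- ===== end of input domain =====

-- B replaces A's three staged indicator-list passes (summed against len) by a single
-- pass accumulating three boolean flags, deciding the category from the flags (objective: alternative).


-- ===== PORT A =====
def star_delim_valid (seq : String) : Bool :=
  if !(PySem.Str.isIn "*" seq) then true
  else if PySem.Str.count seq "*" % 2 == 1 then false
  else if PySem.Str.isIn "**" seq then false
  else true

def sequence_type (seq : String) : String :=
  if !(star_delim_valid seq) then "* DELIMITER MISTAKE"
  else
    let dna := seq.toList.map (fun s => decide (s ∈ ['A', 'C', 'G', 'T', '*']))
    let is_dna := ((dna.map (fun b => if b then (1 : Int) else 0)).sum == PySem.Str.len seq)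
    let rna := seq.toList.map (fun s => decide (s ∈ ['A', 'C', 'G', 'U', '*']))
    let is_rna := ((rna.map (fun b => if b then (1 : Int) else 0)).sum == PySem.Str.len seq)
    let mistake := seq.toList.map (fun s => decide (s ∈ ['A', 'C', 'G', 'U', 'T', '*']))
    let is_mistake := ((mistake.map (fun b => if b then (1 : Int) else 0)).sum == PySem.Str.len seq)
    if is_dna || is_rna then "NUCLEIC ACID"
    else if is_mistake then "UT MISTAKE"
    else "TEXT"

-- ===== PORT B =====
-- one step of B's loop: update the (seen_t, seen_u, other) flags for one character
def seqTypeStep (s : Bool × Bool × Bool) (c : Char) : Bool × Bool × Bool :=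
  if c = 'T' then (true, s.2.1, s.2.2)
  else if c = 'U' then (s.1, true, s.2.2)
  else if !(decide (c ∈ (['A', 'C', 'G', '*'] : List Char))) then (s.1, s.2.1, true)
  else s

def sequence_type_alt (seq : String) : String :=
  if !(star_delim_valid seq) then "* DELIMITER MISTAKE"
  else
    let st := seq.toList.foldl seqTypeStep (false, false, false)
    if st.2.2 then "TEXT"
    else if st.1 && st.2.1 then "UT MISTAKE"
    else "NUCLEIC ACID"

-- ===== PRECONDITION & SPEC =====
def Spec_sequence_type (seq : String) (out : String) : Prop := out = sequence_type_alt seq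
instance (seq : String) (out : String) : Decidable (Spec_sequence_type seq out) := by unfold Spec_sequence_type; infer_instance

-- ===== CLAIM =====
def Claim_equal_sequence_type : Prop := ∀ (seq : String), Dom_sequence_type seq → Spec_sequence_type seq (sequence_type seq)

-- ===== LEMMAS AND PROOFS =====

-- "sum of the 0/1 indicator list equals len" is exactly "every character is in the alphabet"
lemma indicator_sum_eq_all (seq : String) (p : Char → Bool) :
    (seq.toList.map ((fun b => if b = true then (1 : Int) else 0) ∘ p)).sum
      = (seq.length : Int) ↔ ∀ x ∈ seq.toList, p x = true := by
  have h : (seq.toList.map ((fun b => if b = true then (1 : Int) else 0) ∘ p)).sum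
      = (seq.toList.countP p : Int) := by
    simpa [Function.comp] using PySem.List.sum_map_ite_one_zero p seq.toList
  rw [h, ← String.length_toList]
  exact_mod_cast List.countP_eq_length

-- the final state of B's single pass, characterised
lemma foldl_seqTypeStep (l : List Char) (t u o : Bool) :
    l.foldl seqTypeStep (t, u, o) =
      (t || l.contains 'T', u || l.contains 'U',
       o || l.any (fun c => !(decide (c ∈ (['A', 'C', 'G', 'T', 'U', '*'] : List Char))))) := by
  induction l generalizing t u o with
  | nil => simp
  | cons c cs ih =>
    simp only [List.foldl_cons, seqTypeStep]
    by_cases hT : c = 'T'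
    · subst hT; simp [ih]
    · by_cases hU : c = 'U'
      · subst hU; simp [ih]
      · by_cases hM : c ∈ (['A', 'C', 'G', '*'] : List Char)
        · fin_cases hM <;> simp [ih]
        · have hT' : ('T' : Char) ≠ c := fun e => hT e.symm
          have hU' : ('U' : Char) ≠ c := fun e => hU e.symm
          simp only [hM, decide_false, Bool.not_false, if_neg hT, if_neg hU, if_true]
          rw [ih]
          simp_all

-- ===== VERDICT =====
theorem sequence_type_spec : Claim_equal_sequence_type := by
  intro seq _
  unfold Spec_sequence_type sequence_type sequence_type_alt
  by_cases h : star_delim_valid seq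
  · simp only [h, Bool.not_true, Bool.false_eq_true, if_false]
    rw [foldl_seqTypeStep]
    simp [indicator_sum_eq_all]
    by_cases hEx : ∃ x ∈ seq.toList, ¬x = 'A' ∧ ¬x = 'C' ∧ ¬x = 'G' ∧ ¬x = 'T' ∧ ¬x = 'U' ∧ ¬x = '*'
    · obtain ⟨c, hc, h1, h2, h3, h4, h5, h6⟩ := hEx
      have hD : ¬ ∀ x ∈ seq.toList, x = 'A' ∨ x = 'C' ∨ x = 'G' ∨ x = 'T' ∨ x = '*' := by
        intro hall; rcases hall c hc with e|e|e|e|e <;> tauto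
      have hR : ¬ ∀ x ∈ seq.toList, x = 'A' ∨ x = 'C' ∨ x = 'G' ∨ x = 'U' ∨ x = '*' := by
        intro hall; rcases hall c hc with e|e|e|e|e <;> tauto
      have hM : ¬ ∀ x ∈ seq.toList, x = 'A' ∨ x = 'C' ∨ x = 'G' ∨ x = 'U' ∨ x = 'T' ∨ x = '*' := by
        intro hall; rcases hall c hc with e|e|e|e|e|e <;> tauto
      rw [if_neg (not_or.mpr ⟨hD, hR⟩), if_neg hM, if_pos ⟨c, hc, h1, h2, h3, h4, h5, h6⟩]
    · have hM : ∀ x ∈ seq.toList, x = 'A' ∨ x = 'C' ∨ x = 'G' ∨ x = 'U' ∨ x = 'T' ∨ x = '*' := by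
        intro x hx
        by_contra hx'
        exact hEx ⟨x, hx, by tauto⟩
      rw [if_neg hEx]
      by_cases hT : 'T' ∈ seq.toList
      · by_cases hU : 'U' ∈ seq.toList
        · have hD : ¬ ∀ x ∈ seq.toList, x = 'A' ∨ x = 'C' ∨ x = 'G' ∨ x = 'T' ∨ x = '*' := by
            intro hall; rcases hall 'U' hU with e|e|e|e|e <;> simp at e
          have hR : ¬ ∀ x ∈ seq.toList, x = 'A' ∨ x = 'C' ∨ x = 'G' ∨ x = 'U' ∨ x = '*' := by
            intro hall; rcases hall 'T' hT with e|e|e|e|e <;> simp at e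
          rw [if_neg (not_or.mpr ⟨hD, hR⟩), if_pos hM, if_pos ⟨hT, hU⟩]
        · have hD : ∀ x ∈ seq.toList, x = 'A' ∨ x = 'C' ∨ x = 'G' ∨ x = 'T' ∨ x = '*' := by
            intro x hx
            rcases hM x hx with e|e|e|e|e|e
            · tauto
            · tauto
            · tauto
            · exact absurd (e ▸ hx) hU
            · tauto
            · tauto
          rw [if_pos (Or.inl hD), if_neg (by tauto)]
      · have hR : ∀ x ∈ seq.toList, x = 'A' ∨ x = 'C' ∨ x = 'G' ∨ x = 'U' ∨ x = '*' := by
          intro x hx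
          rcases hM x hx with e|e|e|e|e|e
          · tauto
          · tauto
          · tauto
          · tauto
          · exact absurd (e ▸ hx) hT
          · tauto
        rw [if_pos (Or.inr hR), if_neg (by tauto)]
  · simp [h]
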